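-- pv_equiv track=rewrite | github.com/kezarmader/pythonPractice | checkPalindrome1error.py | helper
-- ===== SOURCE A (Python) =====
-- def helper(s, start, end, error):
--     if start == end:
--         return True
--
--     if start == end - 1 and s[start] == s[end]:
--         return True
--
--     if s[start] == s[end]:
--         return helper(s, start + 1, end - 1, error)
--     elif error > 0:
--         return helper(s, start + 1, end, error - 1) or helper(s, start, end - 1, error - 1)
--
--     return False
-- ===== SOURCE B (Python) =====
-- def helper(s, start, end, error):
--     # Bottom-up DP: cost[(i, j)] = minimal number of skips to make s[i..j] a palindrome.
--     cost = {}
--     for j in range(start, end + 1):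
--         for i in range(j, start - 1, -1):
--             if i == j:
--                 cost[(i, j)] = 0
--             elif s[i] == s[j]:
--                 cost[(i, j)] = cost.get((i + 1, j - 1), 0)
--             else:
--                 cost[(i, j)] = 1 + min(cost[(i + 1, j)], cost[(i, j - 1)])
--     return cost.get((start, end), 0) <= max(error, 0)
-- ===== Notes on version B (the rewrite author's own statement) =====
-- stated objective: alternative
-- what changed: replaced the branching recursion over (start,end,error) by a bottom-up dynamic program that tabulates, for every subrange, the minimal number of skips needed and compares that single number with max(error,0)
-- outside the precondition, e.g. on helper('ab', 1, 0, 0): A returns False, B returns True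
import Mathlib
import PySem

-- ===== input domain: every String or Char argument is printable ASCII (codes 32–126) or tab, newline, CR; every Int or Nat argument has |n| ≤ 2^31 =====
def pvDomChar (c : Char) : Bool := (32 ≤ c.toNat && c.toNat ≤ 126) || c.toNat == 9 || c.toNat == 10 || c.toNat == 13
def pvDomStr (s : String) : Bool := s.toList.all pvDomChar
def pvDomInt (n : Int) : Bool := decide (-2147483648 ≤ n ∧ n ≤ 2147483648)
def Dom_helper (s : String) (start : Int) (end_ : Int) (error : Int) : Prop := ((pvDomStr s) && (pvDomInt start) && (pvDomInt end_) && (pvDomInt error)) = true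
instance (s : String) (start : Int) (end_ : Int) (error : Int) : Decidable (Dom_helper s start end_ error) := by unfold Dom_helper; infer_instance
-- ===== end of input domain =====

-- B replaces A's branching recursion over (start, end, error) by a bottom-up dynamic
-- program tabulating the minimal number of skips for every subrange (objective: alternative).

-- ===== PORT A =====
-- literal port of A; s[start] / s[end] are evaluated (in this order) whenever start ≠ end,
-- a none (= IndexError) is excluded by Pre_helper
def helper (s : String) (start : Int) (end_ : Int) (error : Int) : Bool :=
  if start = end_ then true
  else
    match h1 : PySem.List.pyGet? s.toList start, h2 : PySem.List.pyGet? s.toList end_ with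
    | some a, some b =>
      if start = end_ - 1 ∧ a = b then true
      else if a = b then helper s (start + 1) (end_ - 1) error
      else if error > 0 then
        helper s (start + 1) end_ (error - 1) || helper s start (end_ - 1) (error - 1)
      else false
    | _, _ => false
termination_by (end_ - start + 2 * (s.toList.length : Int)).toNat
decreasing_by
  all_goals
    have hi : ¬ PySem.List.pyGet? s.toList start = none := by rw [h1]; simp
    have hj : ¬ PySem.List.pyGet? s.toList end_ = none := by rw [h2]; simp
    rw [PySem.List.pyGet?_eq_none_iff, not_not] at hi hj
    simp only [PySem.Raise.InRange] at hi hj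
    omega

-- ===== PORT B =====
-- one inner-loop body of Source B (the dict writes/reads; Python's cost[(i+1,j)] / cost[(i,j-1)]
-- are always-present keys under Pre_helper, so Dict.getD is exact there)
def altStep (l : List Char) (j : Int) (d : PySem.Dict (Int × Int) Int) (i : Int) :
    PySem.Dict (Int × Int) Int :=
  if i = j then d.insert (i, j) 0
  else if PySem.List.pyGetD l i ' ' = PySem.List.pyGetD l j ' ' then
    d.insert (i, j) (d.getD (i + 1, j - 1) 0)
  else
    d.insert (i, j) (1 + min (d.getD (i + 1, j) 0) (d.getD (i, j - 1) 0))

def helper_alt (s : String) (start : Int) (end_ : Int) (error : Int) : Bool :=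
  let d := (PySem.List.pyRange start (end_ + 1) 1).foldl
    (fun d j => (PySem.List.pyRange j (start - 1) (-1)).foldl (altStep s.toList j) d)
    PySem.Dict.empty
  decide (d.getD (start, end_) 0 ≤ max error 0)

-- ===== PRECONDITION & SPEC =====
-- Pre_ excludes inputs with start > end ≠ start, where A's value (reached through
-- negative-index wraparound and base cases no caller intends) is accidental and B's empty
-- DP naturally disagrees, and inputs whose indices run off the string, where A raises IndexError.
def Pre_helper (s : String) (start : Int) (end_ : Int) (error : Int) : Prop :=
  start = end_ ∨
    (start ≤ end_ ∧ -(s.toList.length : Int) ≤ start ∧ end_ < (s.toList.length : Int))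
instance (s : String) (start : Int) (end_ : Int) (error : Int) :
    Decidable (Pre_helper s start end_ error) := by unfold Pre_helper; infer_instance

def pvWitness_helper : String × Int × Int × Int := ("aba", 0, 2, 1)

def Spec_helper (s : String) (start : Int) (end_ : Int) (error : Int) (out : Bool) : Prop :=
  out = helper_alt s start end_ error
instance (s : String) (start : Int) (end_ : Int) (error : Int) (out : Bool) :
    Decidable (Spec_helper s start end_ error out) := by unfold Spec_helper; infer_instance

-- ===== CLAIM (what is proved, stated in full; the proofs are below) =====
def Claim_equal_helper : Prop := ∀ (s : String) (start : Int) (end_ : Int) (error : Int), Dom_helper s start end_ error → Pre_helper s start end_ error → Spec_helper s start end_ error (helper s start end_ error)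

-- ===== LEMMAS AND PROOFS =====

-- minimal number of skips needed to turn s[i..j] into a palindrome (the value Source B tabulates)
def cost (l : List Char) (i : Int) (j : Int) : Int :=
  if i < j then
    if PySem.List.pyGetD l i ' ' = PySem.List.pyGetD l j ' ' then cost l (i + 1) (j - 1)
    else 1 + min (cost l (i + 1) j) (cost l i (j - 1))
  else 0
termination_by (j - i).toNat
decreasing_by all_goals omega

lemma cost_nonneg_aux : ∀ (n : Nat) (l : List Char) (i j : Int), (j - i).toNat = n → 0 ≤ cost l i j := by
  intro n
  induction n using Nat.strong_induction_on with
  | _ n ih =>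
    intro l i j hn
    rw [cost]
    split_ifs with h hc
    · exact ih (j - 1 - (i + 1)).toNat (by omega) l _ _ rfl
    · have h1 := ih (j - (i + 1)).toNat (by omega) l (i + 1) j rfl
      have h2 := ih (j - 1 - i).toNat (by omega) l i (j - 1) rfl
      omega
    · omega

lemma cost_nonneg (l : List Char) (i j : Int) : 0 ≤ cost l i j :=
  cost_nonneg_aux (j - i).toNat l i j rfl

lemma pyGet?_eq_some_pyGetD (l : List Char) (i : Int) (h1 : -(l.length : Int) ≤ i)
    (h2 : i < (l.length : Int)) :
    PySem.List.pyGet? l i = some (PySem.List.pyGetD l i ' ') := by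
  have hne : ¬ PySem.List.pyGet? l i = none := by
    rw [PySem.List.pyGet?_eq_none_iff, not_not]
    simp only [PySem.Raise.InRange]
    omega
  cases h : PySem.List.pyGet? l i with
  | none => exact absurd h hne
  | some a => simp [PySem.List.pyGetD, h]

lemma helper_eq_cost : ∀ (n : Nat) (s : String) (i j e : Int), (j - i).toNat = n →
    i ≤ j → (i = j ∨ (-(s.toList.length : Int) ≤ i ∧ j < (s.toList.length : Int))) →
    helper s i j e = decide (cost s.toList i j ≤ max e 0) := by
  intro n
  induction n using Nat.strong_induction_on with
  | _ n ih =>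
    intro s i j e hn hij hb
    by_cases hieq : i = j
    · subst hieq
      rw [helper, if_pos rfl, cost]
      rw [if_neg (lt_irrefl i)]
      simp
    · have hlt : i < j := lt_of_le_of_ne hij hieq
      obtain ⟨hlo, hhi⟩ : -(s.toList.length : Int) ≤ i ∧ j < (s.toList.length : Int) := by
        rcases hb with h | h
        · exact absurd h hieq
        · exact h
      have hgi := pyGet?_eq_some_pyGetD s.toList i hlo (by omega)
      have hgj := pyGet?_eq_some_pyGetD s.toList j (by omega) hhi
      rw [helper, if_neg hieq]
      rw [hgi, hgj]
      simp only []
      by_cases hc : PySem.List.pyGetD s.toList i ' ' = PySem.List.pyGetD s.toList j ' '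
      · by_cases hadj : i = j - 1
        · have hstep : cost s.toList i j = cost s.toList (i + 1) (j - 1) := by
            rw [cost, if_pos hlt, if_pos hc]
          have hzero : cost s.toList (i + 1) (j - 1) = 0 := by
            rw [cost, if_neg (by omega)]
          rw [if_pos ⟨hadj, hc⟩, hstep, hzero]
          simp
        · have hstep : cost s.toList i j = cost s.toList (i + 1) (j - 1) := by
            rw [cost, if_pos hlt, if_pos hc]
          rw [if_neg (by rintro ⟨h, _⟩; exact hadj h), if_pos hc]
          rw [ih (j - 1 - (i + 1)).toNat (by omega) s (i + 1) (j - 1) e rfl (by omega)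
            (Or.inr (by omega)), hstep]
      · rw [if_neg (by rintro ⟨_, h⟩; exact hc h), if_neg hc]
        have hcost : cost s.toList i j
            = 1 + min (cost s.toList (i + 1) j) (cost s.toList i (j - 1)) := by
          rw [cost, if_pos hlt, if_neg hc]
        by_cases he : e > 0
        · rw [if_pos he]
          rw [ih (j - (i + 1)).toNat (by omega) s (i + 1) j (e - 1) rfl (by omega)
            (by by_cases h : i + 1 = j; exact Or.inl h; exact Or.inr (by omega))]
          rw [ih (j - 1 - i).toNat (by omega) s i (j - 1) (e - 1) rfl (by omega)
            (by by_cases h : i = j - 1; exact Or.inl h; exact Or.inr (by omega))]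
          rw [hcost]
          rw [← Bool.decide_or, decide_eq_decide]
          omega
        · rw [if_neg he, hcost]
          have n1 := cost_nonneg s.toList (i + 1) j
          have n2 := cost_nonneg s.toList i (j - 1)
          symm
          rw [decide_eq_false_iff_not]
          omega

lemma inner_spec (l : List Char) (start j : Int) :
    ∀ (n : Nat) (i : Int) (d : PySem.Dict (Int × Int) Int),
    (i - (start - 1)).toNat = n → start - 1 ≤ i → i ≤ j →
    (∀ p q : Int, q < p → d.getD (p, q) 0 = 0) →
    (∀ p q : Int, start ≤ p → p ≤ q → q < j → d.getD (p, q) 0 = cost l p q) →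
    (∀ p : Int, i < p → p ≤ j → d.getD (p, j) 0 = cost l p j) →
    ((∀ p q : Int, q < p →
        ((PySem.List.pyRange i (start - 1) (-1)).foldl (altStep l j) d).getD (p, q) 0 = 0) ∧
     (∀ p q : Int, start ≤ p → p ≤ q → q < j →
        ((PySem.List.pyRange i (start - 1) (-1)).foldl (altStep l j) d).getD (p, q) 0 = cost l p q) ∧
     (∀ p : Int, start - 1 < p → p ≤ j →
        ((PySem.List.pyRange i (start - 1) (-1)).foldl (altStep l j) d).getD (p, j) 0 = cost l p j)) := by
  intro n
  induction n with
  | zero =>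
    intro i d hn hi1 hij hc1 hc2 hc3
    have : i = start - 1 := by omega
    subst this
    rw [PySem.List.pyRange_neg_one_eq_nil (le_refl _)]
    exact ⟨hc1, hc2, fun p hp hpj => hc3 p (by omega) hpj⟩
  | succ m ihm =>
    intro i d hn hi1 hij hc1 hc2 hc3
    have hgt : start - 1 < i := by omega
    rw [PySem.List.pyRange_neg_one_cons hgt, List.foldl_cons]
    have histart : start ≤ i := by omega
    -- the newly inserted value equals cost l i j
    have hval : (altStep l j d i).getD (i, j) 0 = cost l i j := by
      by_cases hieq : i = j
      · subst hieq
        rw [altStep, if_pos rfl, PySem.Dict.getD_insert, if_pos rfl, cost, if_neg (lt_irrefl i)]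
      · have hlt : i < j := by omega
        by_cases hc : PySem.List.pyGetD l i ' ' = PySem.List.pyGetD l j ' '
        · rw [altStep, if_neg hieq, if_pos hc, PySem.Dict.getD_insert, if_pos rfl]
          have hcost : cost l i j = cost l (i + 1) (j - 1) := by
            rw [cost, if_pos hlt, if_pos hc]
          rw [hcost]
          by_cases hord : i + 1 ≤ j - 1
          · exact hc2 (i + 1) (j - 1) (by omega) hord (by omega)
          · rw [hc1 (i + 1) (j - 1) (by omega), cost, if_neg (by omega)]
        · rw [altStep, if_neg hieq, if_neg hc, PySem.Dict.getD_insert, if_pos rfl]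
          have hcost : cost l i j = 1 + min (cost l (i + 1) j) (cost l i (j - 1)) := by
            rw [cost, if_pos hlt, if_neg hc]
          rw [hcost, hc3 (i + 1) (by omega) (by omega), hc2 i (j - 1) histart (by omega) (by omega)]
    -- the step preserves the other entries
    have hpres : ∀ p q : Int, ¬ (p = i ∧ q = j) → (altStep l j d i).getD (p, q) 0 = d.getD (p, q) 0 := by
      intro p q hne
      have hkey : ((p, q) : Int × Int) ≠ (i, j) := by
        intro h; exact hne ⟨congrArg Prod.fst h, congrArg Prod.snd h⟩
      rw [altStep]
      split_ifs <;> rw [PySem.Dict.getD_insert, if_neg hkey]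
    refine ihm (i - 1) (altStep l j d i) (by omega) (by omega) (by omega) ?_ ?_ ?_
    · intro p q hqp
      rw [hpres p q (by rintro ⟨rfl, rfl⟩; omega)]
      exact hc1 p q hqp
    · intro p q hp hpq hq
      rw [hpres p q (by rintro ⟨rfl, rfl⟩; omega)]
      exact hc2 p q hp hpq hq
    · intro p hip hpj
      by_cases hpi : p = i
      · subst hpi; exact hval
      · rw [hpres p j (fun h => hpi h.1)]
        exact hc3 p (by omega) hpj

lemma outer_spec (l : List Char) (start end_ : Int) :
    ∀ (n : Nat) (J : Int) (d : PySem.Dict (Int × Int) Int),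
    (end_ + 1 - J).toNat = n → start ≤ J →
    (∀ p q : Int, q < p → d.getD (p, q) 0 = 0) →
    (∀ p q : Int, start ≤ p → p ≤ q → q < J → d.getD (p, q) 0 = cost l p q) →
    (∀ p q : Int, start ≤ p → p ≤ q → q < end_ + 1 →
      ((PySem.List.pyRange J (end_ + 1) 1).foldl
        (fun d j => (PySem.List.pyRange j (start - 1) (-1)).foldl (altStep l j) d) d).getD (p, q) 0
        = cost l p q) := by
  intro n
  induction n with
  | zero =>
    intro J d hn hJ hc1 hc2 p q hp hpq hq
    rw [PySem.List.pyRange_one_eq_nil (by omega)]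
    exact hc2 p q hp hpq (by omega)
  | succ m ihm =>
    intro J d hn hJ hc1 hc2
    have hJE : J < end_ + 1 := by omega
    rw [PySem.List.pyRange_one_cons hJE, List.foldl_cons]
    have hinner := inner_spec l start J (J - (start - 1)).toNat J d rfl (by omega)
      (le_refl J) hc1 hc2 (fun p hip hpj => by omega)
    obtain ⟨k1, k2, k3⟩ := hinner
    refine ihm (J + 1) _ (by omega) (by omega) k1 ?_
    intro p q hp hpq hq
    by_cases hqJ : q = J
    · subst hqJ; exact k3 p (by omega) hpq
    · exact k2 p q hp hpq (by omega)


lemma alt_eq_cost (s : String) (start end_ e : Int) (hse : start ≤ end_) :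
    helper_alt s start end_ e = decide (cost s.toList start end_ ≤ max e 0) := by
  have h := outer_spec s.toList start end_ (end_ + 1 - start).toNat start PySem.Dict.empty
    rfl (le_refl _) (fun p q _ => PySem.Dict.getD_empty _ _)
    (fun p q hp hpq hq => absurd hq (by omega)) start end_ (le_refl _) hse (by omega)
  simp only [helper_alt]
  rw [h]

-- ===== VERDICT (by name: the statement is the Claim_ definition above) =====
theorem helper_spec : Claim_equal_helper := by
  intro s start end_ error _ hpre
  unfold Spec_helper
  have hse : start ≤ end_ := by rcases hpre with h | h; omega; exact h.1
  rw [alt_eq_cost s start end_ error hse]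
  exact helper_eq_cost (end_ - start).toNat s start end_ error rfl hse
    (by rcases hpre with h | h; exact Or.inl h; exact Or.inr ⟨h.2.1, h.2.2⟩)
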